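-- pv_equiv track=rewrite | github.com/FilippoPisello/advent-of-code | advent_of_code/y2025/day11/max/solution.py | main_part_two
-- ===== SOURCE A (Python) =====
-- from typing import Any
-- from functools import cache
--
-- def main_part_two(problem_input: str) -> Any:
--     lines = problem_input.splitlines()
--     mandatory_nodes = frozenset(["fft", "dac"])
--
--     server_tree = {}
--     for line in lines:
--         name, seeds = line.split(": ")
--         seeds = tuple(seeds.split(" "))
--         server_tree[name] = seeds
--
--     @cache
--     def count_paths(node: str, visited_mandatory: frozenset) -> int:
--         if node in mandatory_nodes:
--             visited_mandatory = visited_mandatory | {node}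
--
--         if node == "out":
--             return 1 if visited_mandatory == mandatory_nodes else 0
--
--         if node not in server_tree:
--             return 0
--
--         total = 0
--         for child in server_tree[node]:
--             total += count_paths(child, visited_mandatory)
--
--         return total
--
--     return count_paths("svr", frozenset())
-- ===== SOURCE B (Python) =====
-- from functools import cache
--
-- def main_part_two(problem_input: str):
--     server_tree = {}
--     for line in problem_input.splitlines():
--         name, seeds = line.split(": ")
--         server_tree[name] = tuple(seeds.split(" "))
--
--     @cache
--     def vec(node):
--         # (c_none, c_fft, c_dac, c_both): counts of node->out paths grouped by
--         # which of the mandatory nodes {fft, dac} they visit (node included)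
--         if node == "out":
--             base = (1, 0, 0, 0)
--         elif node not in server_tree:
--             return (0, 0, 0, 0)
--         else:
--             a = b = c = d = 0
--             for child in server_tree[node]:
--                 w, x, y, z = vec(child)
--                 a += w; b += x; c += y; d += z
--             base = (a, b, c, d)
--         if node == "fft":
--             return (0, base[0] + base[1], 0, base[2] + base[3])
--         if node == "dac":
--             return (0, 0, base[0] + base[2], base[1] + base[3])
--         return base
--
--     return vec("svr")[3]
-- ===== Notes on version B (the rewrite author's own statement) =====
-- stated objective: alternative
-- what changed: Replaces the top-down recursion parameterised by the frozenset of already-visited mandatory nodes with a single memoized per-node function returning a 4-vector of path counts classified by which of {fft,dac} the path visits; the answer is one projection of the vector at svr.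
import Mathlib
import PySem

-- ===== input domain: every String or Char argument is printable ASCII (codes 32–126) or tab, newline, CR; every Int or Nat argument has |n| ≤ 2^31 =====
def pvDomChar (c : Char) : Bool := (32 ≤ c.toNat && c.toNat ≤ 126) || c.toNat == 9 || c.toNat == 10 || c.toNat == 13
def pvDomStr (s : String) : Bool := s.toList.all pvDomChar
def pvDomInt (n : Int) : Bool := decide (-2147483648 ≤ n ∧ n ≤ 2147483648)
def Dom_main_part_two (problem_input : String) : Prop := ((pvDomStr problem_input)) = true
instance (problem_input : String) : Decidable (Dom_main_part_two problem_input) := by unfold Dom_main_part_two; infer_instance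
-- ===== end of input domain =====

-- B replaces A's recursion over (node, visited-mandatory-subset) by one memoized per-node
-- 4-vector of path counts classified by mandatory nodes visited; same return value.

-- ===== PORT A =====
-- parsing loop shared verbatim by both Pythons ('name, seeds = line.split(": ")'; the
-- non-2-parts ValueError case is excluded by Pre_, the '| _ => d' arm is only a totality guard)
def pvParse (lines : List String) : PySem.Dict String (List String) :=
  lines.foldl (fun d line =>
    match (PySem.Str.split? line ": ").getD [] with
    | [name, seeds] => d.insert name ((PySem.Str.split? seeds " ").getD [])
    | _ => d) PySem.Dict.empty

-- count_paths of A; fuel is a totality guard only (Pre_ admits only inputs where the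
-- Python recursion terminates, and there depth ≤ lines+1 so the fuel below never runs out)
def pvCountA (tree : PySem.Dict String (List String)) : Nat → String → PySem.Set String → Int
  | 0, _, _ => 0
  | fuel+1, node, visited =>
    let v := if (PySem.Set.ofList ["fft", "dac"]).contains node then PySem.Set.add visited node
             else visited
    if node = "out" then (if PySem.Set.equal v (PySem.Set.ofList ["fft", "dac"]) then 1 else 0)
    else
      match tree.get? node with
      | none => 0
      | some children => children.foldl (fun total child => total + pvCountA tree fuel child v) 0

def main_part_two (problem_input : String) : Int :=
  let lines := PySem.Str.splitlines problem_input
  let tree := pvParse lines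
  pvCountA tree (lines.length + 2) "svr" PySem.Set.empty

-- ===== PORT B =====
-- vec of B: (c_none, c_fft, c_dac, c_both); same fuel totality guard as A's port
def pvVecB (tree : PySem.Dict String (List String)) : Nat → String → Int × Int × Int × Int
  | 0, _ => (0, 0, 0, 0)
  | fuel+1, node =>
    let base? : Option (Int × Int × Int × Int) :=
      if node = "out" then some (1, 0, 0, 0)
      else
        match tree.get? node with
        | none => none
        | some children =>
          some (children.foldl
            (fun acc child =>
              let w := pvVecB tree fuel child
              (acc.1 + w.1, acc.2.1 + w.2.1, acc.2.2.1 + w.2.2.1, acc.2.2.2 + w.2.2.2))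
            ((0 : Int), (0 : Int), (0 : Int), (0 : Int)))
    match base? with
    | none => (0, 0, 0, 0)
    | some base =>
      if node = "fft" then (0, base.1 + base.2.1, 0, base.2.2.1 + base.2.2.2)
      else if node = "dac" then (0, 0, base.1 + base.2.2.1, base.2.1 + base.2.2.2)
      else base

def main_part_two_alt (problem_input : String) : Int :=
  let lines := PySem.Str.splitlines problem_input
  let tree := pvParse lines
  (pvVecB tree (lines.length + 2) "svr").2.2.2

-- ===== PRECONDITION & SPEC =====
-- bounded reachability in the parsed graph (≤ n edges)
def pvReachN (tree : PySem.Dict String (List String)) : Nat → String → String → Bool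
  | 0, a, b => a == b
  | n+1, a, b => a == b || (tree.getD a []).any (fun c => pvReachN tree n c b)

-- Pre_ = exactly the inputs where Python A returns: every line splits into exactly two
-- pieces at ": " (else ValueError), and no node reachable from "svr" lies on a cycle
-- (else the recursion never terminates / RecursionError).
def Pre_main_part_two (problem_input : String) : Prop :=
  (∀ line ∈ PySem.Str.splitlines problem_input,
      ((PySem.Str.split? line ": ").getD []).length = 2) ∧
  (∀ k ∈ (pvParse (PySem.Str.splitlines problem_input)).keys,
      ¬ (pvReachN (pvParse (PySem.Str.splitlines problem_input))
            ((pvParse (PySem.Str.splitlines problem_input)).keys.length + 1) "svr" k = true ∧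
         ((pvParse (PySem.Str.splitlines problem_input)).getD k []).any
            (fun c => pvReachN (pvParse (PySem.Str.splitlines problem_input))
              ((pvParse (PySem.Str.splitlines problem_input)).keys.length + 1) c k) = true))

instance (problem_input : String) : Decidable (Pre_main_part_two problem_input) := by
  unfold Pre_main_part_two; infer_instance

def pvWitness_main_part_two : String := "svr: fft dac\nfft: dac\ndac: out"

def Spec_main_part_two (problem_input : String) (out : Int) : Prop := out = main_part_two_alt problem_input
instance (problem_input : String) (out : Int) : Decidable (Spec_main_part_two problem_input out) := by unfold Spec_main_part_two; infer_instance

-- ===== CLAIM (what is proved, stated in full; the proofs are below) =====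
def Claim_equal_main_part_two : Prop := ∀ (problem_input : String), Dom_main_part_two problem_input → Pre_main_part_two problem_input → Spec_main_part_two problem_input (main_part_two problem_input)

-- ===== LEMMAS AND PROOFS =====

-- visited only ever holds elements of {fft, dac}, added by PySem.Set.add
def pvInv (s : PySem.Set String) : Prop :=
  s = [] ∨ s = ["fft"] ∨ s = ["dac"] ∨ s = ["fft", "dac"] ∨ s = ["dac", "fft"]

-- the number of paths A still counts from `visited`, read off B's 4-vector
def pvPick (visited : List String) (v : Int × Int × Int × Int) : Int :=
  if "fft" ∈ visited then
    (if "dac" ∈ visited then v.1 + v.2.1 + v.2.2.1 + v.2.2.2 else v.2.2.1 + v.2.2.2)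
  else
    (if "dac" ∈ visited then v.2.1 + v.2.2.2 else v.2.2.2)

lemma pvPick_add (s : List String) (a b : Int × Int × Int × Int) :
    pvPick s (a.1 + b.1, a.2.1 + b.2.1, a.2.2.1 + b.2.2.1, a.2.2.2 + b.2.2.2)
      = pvPick s a + pvPick s b := by
  unfold pvPick; split_ifs <;> ring

-- A's one-step mark of `visited` by `node`
def pvMarkA (node : String) (visited : PySem.Set String) : PySem.Set String :=
  if (PySem.Set.ofList ["fft", "dac"]).contains node then PySem.Set.add visited node else visited

lemma pvInv_mark (node : String) (visited : PySem.Set String) (h : pvInv visited) :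
    pvInv (pvMarkA node visited) := by
  unfold pvMarkA
  by_cases hf : node = "fft"
  · subst hf; rcases h with h|h|h|h|h <;> subst h <;> simp [pvInv, PySem.Set.add, PySem.Set.contains, PySem.Set.ofList]
  by_cases hd : node = "dac"
  · subst hd; rcases h with h|h|h|h|h <;> subst h <;> simp [pvInv, PySem.Set.add, PySem.Set.contains, PySem.Set.ofList]
  · have : (PySem.Set.ofList ["fft", "dac"]).contains node = false := by
      simp [PySem.Set.contains, PySem.Set.ofList, hf, hd]
    rw [this]; simpa using h

-- B's one-step mark of the child-sum by `node`
def pvMarkB (node : String) (base : Int × Int × Int × Int) : Int × Int × Int × Int :=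
  if node = "fft" then (0, base.1 + base.2.1, 0, base.2.2.1 + base.2.2.2)
  else if node = "dac" then (0, 0, base.1 + base.2.2.1, base.2.1 + base.2.2.2)
  else base

-- marking on B's side commutes with pvPick
lemma pick_mark (node : String) (visited : PySem.Set String) (h : pvInv visited)
    (base : Int × Int × Int × Int) :
    pvPick visited (pvMarkB node base) = pvPick (pvMarkA node visited) base := by
  obtain ⟨b1, b2, b3, b4⟩ := base
  unfold pvMarkA pvMarkB
  by_cases hf : node = "fft"
  · subst hf
    rcases h with h|h|h|h|h <;> subst h <;>
      simp [pvPick, PySem.Set.add, PySem.Set.contains, PySem.Set.ofList] <;> ring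
  by_cases hd : node = "dac"
  · subst hd
    rcases h with h|h|h|h|h <;> subst h <;>
      simp [pvPick, PySem.Set.add, PySem.Set.contains, PySem.Set.ofList] <;> ring
  · have hc : (PySem.Set.ofList ["fft", "dac"]).contains node = false := by
      simp [PySem.Set.contains, PySem.Set.ofList, hf, hd]
    rw [if_neg hf, if_neg hd, hc]; simp

lemma pvPick_zero (s : List String) : pvPick s (0, 0, 0, 0) = 0 := by
  unfold pvPick; split_ifs <;> ring

lemma fold_eq (tree : PySem.Dict String (List String)) (f : Nat) (v' : PySem.Set String)
    (hrec : ∀ c, pvCountA tree f c v' = pvPick v' (pvVecB tree f c)) :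
    ∀ (children : List String) (aA : Int) (aB : Int × Int × Int × Int), aA = pvPick v' aB →
      children.foldl (fun total child => total + pvCountA tree f child v') aA
        = pvPick v' (children.foldl (fun acc child =>
            let w := pvVecB tree f child
            (acc.1 + w.1, acc.2.1 + w.2.1, acc.2.2.1 + w.2.2.1, acc.2.2.2 + w.2.2.2)) aB) := by
  intro children
  induction children with
  | nil => intro aA aB hacc; simpa using hacc
  | cons c cs ihc =>
    intro aA aB hacc
    simp only [List.foldl_cons]
    exact ihc _ _ (by rw [pvPick_add, hacc, hrec])

lemma countA_eq_pick (tree : PySem.Dict String (List String)) :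
    ∀ (f : Nat) (node : String) (visited : PySem.Set String), pvInv visited →
      pvCountA tree f node visited = pvPick visited (pvVecB tree f node) := by
  intro f
  induction f with
  | zero =>
    intro node visited h
    rcases h with h|h|h|h|h <;> subst h <;> simp [pvCountA, pvVecB, pvPick]
  | succ f ih =>
    intro node visited hInv
    by_cases hout : node = "out"
    · subst hout
      have hv : pvMarkA "out" visited = visited := by
        simp [pvMarkA, PySem.Set.contains, PySem.Set.ofList]
      have hA : pvCountA tree (f+1) "out" visited
          = (if PySem.Set.equal visited (PySem.Set.ofList ["fft", "dac"]) then (1:Int) else 0) := by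
        show (if ("out" : String) = "out" then
                (if PySem.Set.equal (pvMarkA "out" visited) (PySem.Set.ofList ["fft", "dac"])
                 then (1:Int) else 0)
              else
                match tree.get? "out" with
                | none => 0
                | some children =>
                  children.foldl
                    (fun total child => total + pvCountA tree f child (pvMarkA "out" visited)) 0)
            = _
        rw [if_pos rfl, hv]
      have hvec : pvVecB tree (f+1) "out" = (1, 0, 0, 0) := by simp [pvVecB]
      rw [hA, hvec]
      rcases hInv with h|h|h|h|h <;> subst h <;> decide
    · have hInv' : pvInv (pvMarkA node visited) := pvInv_mark node visited hInv
      have hA : pvCountA tree (f+1) node visited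
          = (match tree.get? node with
             | none => (0:Int)
             | some children =>
               children.foldl
                 (fun total child => total + pvCountA tree f child (pvMarkA node visited)) 0) := by
        show (if node = "out" then
                (if PySem.Set.equal (pvMarkA node visited) (PySem.Set.ofList ["fft", "dac"])
                 then (1:Int) else 0)
              else
                match tree.get? node with
                | none => 0
                | some children =>
                  children.foldl
                    (fun total child => total + pvCountA tree f child (pvMarkA node visited)) 0)
            = _
        rw [if_neg hout]
      cases hch : tree.get? node with
      | none =>
        have hvec : pvVecB tree (f+1) node = (0, 0, 0, 0) := by
          show (match (if node = "out" then some ((1:Int), (0:Int), (0:Int), (0:Int))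
                       else
                         match tree.get? node with
                         | none => none
                         | some children =>
                           some (children.foldl
                             (fun acc child =>
                               let w := pvVecB tree f child
                               (acc.1 + w.1, acc.2.1 + w.2.1, acc.2.2.1 + w.2.2.1,
                                acc.2.2.2 + w.2.2.2))
                             ((0:Int), (0:Int), (0:Int), (0:Int)))) with
               | none => ((0:Int), (0:Int), (0:Int), (0:Int))
               | some base => pvMarkB node base)
              = _
          rw [if_neg hout, hch]
        rw [hA, hch, hvec, pvPick_zero]
      | some children =>
        have hvec : pvVecB tree (f+1) node
            = pvMarkB node (children.foldl
                (fun acc child =>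
                  let w := pvVecB tree f child
                  (acc.1 + w.1, acc.2.1 + w.2.1, acc.2.2.1 + w.2.2.1, acc.2.2.2 + w.2.2.2))
                ((0:Int), (0:Int), (0:Int), (0:Int))) := by
          show (match (if node = "out" then some ((1:Int), (0:Int), (0:Int), (0:Int))
                       else
                         match tree.get? node with
                         | none => none
                         | some children =>
                           some (children.foldl
                             (fun acc child =>
                               let w := pvVecB tree f child
                               (acc.1 + w.1, acc.2.1 + w.2.1, acc.2.2.1 + w.2.2.1,
                                acc.2.2.2 + w.2.2.2))
                             ((0:Int), (0:Int), (0:Int), (0:Int)))) with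
               | none => ((0:Int), (0:Int), (0:Int), (0:Int))
               | some base => pvMarkB node base)
              = _
          rw [if_neg hout, hch]
        rw [hA, hch, hvec, pick_mark node visited hInv]
        exact fold_eq tree f (pvMarkA node visited) (fun c => ih c (pvMarkA node visited) hInv')
          children 0 (0, 0, 0, 0) (pvPick_zero _).symm

-- ===== VERDICT (by name: the statement is the Claim_ definition above) =====
theorem main_part_two_spec : Claim_equal_main_part_two := by
  intro pi _ _
  show pvCountA (pvParse (PySem.Str.splitlines pi)) ((PySem.Str.splitlines pi).length + 2) "svr"
        PySem.Set.empty
      = (pvVecB (pvParse (PySem.Str.splitlines pi)) ((PySem.Str.splitlines pi).length + 2) "svr").2.2.2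
  rw [countA_eq_pick _ _ "svr" PySem.Set.empty (Or.inl rfl)]
  simp [pvPick]
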